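-- pv_equiv track=rewrite | github.com/dexman/AdventOfCode | 2017/aoc02.py | row_dividers
-- ===== SOURCE A (Python) =====
-- def row_dividers(row):
--     row = sorted(row)
--     def perform(row):
--         if len(row) == 0:
--             return 0
--         head, *tail = sorted(row)
--         for n in tail:
--             if n % head == 0:
--                 return n // head
--         return row_dividers(tail)
--     return perform(row)
-- ===== SOURCE B (Python) =====
-- def row_dividers(row):
--     s = sorted(row)
--     n = len(s)
--     for i in range(n):
--         for j in range(i + 1, n):
--             if s[j] % s[i] == 0:
--                 return s[j] // s[i]
--     return 0
-- ===== Notes on version B (the rewrite author's own statement) =====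
-- stated objective: simpler
-- what changed: Replaces the tail recursion that re-sorts the shrinking tail at every step with one sort followed by an explicit index-based double loop over the sorted row.
import Mathlib
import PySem

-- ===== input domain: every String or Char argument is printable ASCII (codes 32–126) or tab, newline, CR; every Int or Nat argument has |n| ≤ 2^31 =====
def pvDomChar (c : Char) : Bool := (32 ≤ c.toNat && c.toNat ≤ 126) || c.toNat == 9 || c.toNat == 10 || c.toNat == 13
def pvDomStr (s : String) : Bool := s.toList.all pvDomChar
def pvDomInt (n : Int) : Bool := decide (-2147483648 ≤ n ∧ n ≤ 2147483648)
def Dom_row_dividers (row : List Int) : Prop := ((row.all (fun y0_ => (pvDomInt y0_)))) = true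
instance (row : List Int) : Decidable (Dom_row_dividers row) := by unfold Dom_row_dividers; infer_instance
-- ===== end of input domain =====

-- B replaces A's tail recursion (which re-sorts every shrinking tail) by one sort plus an
-- explicit index-based double loop; objective: simpler. Return-value equivalence only (no mutation).

-- ===== PORT A =====
-- the inner 'for n in tail: if n % head == 0: return n // head'
def rdScan (head : Int) : List Int → Option Int
  | [] => none
  | n :: ns =>
      if PySem.Int.mod n head = 0 then some (PySem.Int.floordiv n head) else rdScan head ns

-- perform(row): len check, re-sort, destructure, scan, else row_dividers(tail) = perform(sorted(tail))
def rdPerform : List Int → Int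
  | [] => 0
  | a :: as =>
      match hs : PySem.List.sorted (a :: as) (fun x => x) false with
      | [] => 0   -- unreachable: a sorted nonempty list is nonempty
      | head :: tail =>
        match rdScan head tail with
        | some q => q
        | none => rdPerform (PySem.List.sorted tail (fun x => x) false)
termination_by row => row.length
decreasing_by
  have h1 : (PySem.List.sorted (a :: as) (fun x => x) false).length = as.length + 1 := by
    simp [PySem.List.length_sorted]
  have h2 : (PySem.List.sorted tail (fun x => x) false).length = tail.length := by
    simp [PySem.List.length_sorted]
  rw [hs] at h1
  simp at h1
  simp [h2]
  omega

def row_dividers (row : List Int) : Int :=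
  rdPerform (PySem.List.sorted row (fun x => x) false)

-- ===== PORT B =====
-- the inner 'for j in range(i+1, n): if s[j] % s[i] == 0: return s[j] // s[i]'
def altJ (s : List Int) (vi : Int) : List Int → Option Int
  | [] => none
  | j :: js =>
      let vj := (PySem.List.pyGet? s j).getD 0  -- j drawn from range(i+1, len(s)): always in range
      if PySem.Int.mod vj vi = 0 then some (PySem.Int.floordiv vj vi) else altJ s vi js

-- the outer 'for i in range(n)'
def altI (s : List Int) : List Int → Int
  | [] => 0
  | i :: is =>
      let vi := (PySem.List.pyGet? s i).getD 0
      match altJ s vi (PySem.List.pyRange (i + 1) s.length 1) with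
      | some q => q
      | none => altI s is

def row_dividers_alt (row : List Int) : Int :=
  let s := PySem.List.sorted row (fun x => x) false
  altI s (PySem.List.pyRange 0 s.length 1)

-- ===== PRECONDITION & SPEC =====
-- Pre_ excludes exactly the inputs on which A raises ZeroDivisionError: rows of length ≥ 2
-- whose elements are all ≥ 0 and include 0 (then 0 becomes the first candidate divisor;
-- with any negative element present, 0 divides by the negative head and A returns).
def Pre_row_dividers (row : List Int) : Prop :=
  ¬ ((0 : Int) ∈ row ∧ 2 ≤ row.length ∧ ∀ x ∈ row, 0 ≤ x)
instance (row : List Int) : Decidable (Pre_row_dividers row) := by unfold Pre_row_dividers; infer_instance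
def pvWitness_row_dividers : List Int := [5, 10, 3]

def Spec_row_dividers (row : List Int) (out : Int) : Prop := out = row_dividers_alt row
instance (row : List Int) (out : Int) : Decidable (Spec_row_dividers row out) := by unfold Spec_row_dividers; infer_instance

-- ===== CLAIM (what is proved, stated in full; the proofs are below) =====
def Claim_equal_row_dividers : Prop := ∀ (row : List Int), Dom_row_dividers row → Pre_row_dividers row → Spec_row_dividers row (row_dividers row)

-- ===== LEMMAS AND PROOFS =====

-- inner loop: the index loop over range(k, len s) scans exactly the suffix s.drop k
theorem altJ_eq_rdScan (s : List Int) (vi : Int) (k : Nat) (hk : k ≤ s.length) :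
    altJ s vi (PySem.List.pyRange (k : Int) s.length 1) = rdScan vi (s.drop k) := by
  induction hd : s.length - k generalizing k with
  | zero =>
      have hk' : k = s.length := by omega
      subst hk'
      rw [List.drop_length]
      have : PySem.List.pyRange (s.length : Int) s.length 1 = [] := by
        simp
      rw [this]
      rfl
  | succ m ih =>
      have hlt : k < s.length := by omega
      rw [PySem.List.pyRange_one_cons (by exact_mod_cast hlt)]
      have hget : (PySem.List.pyGet? s (k : Int)).getD 0 = s[k] := by
        rw [PySem.List.pyGet?_natCast]
        simp [List.getElem?_eq_getElem hlt]
      have hdrop : s.drop k = s[k] :: s.drop (k + 1) := List.drop_eq_getElem_cons hlt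
      rw [hdrop]
      show (let vj := (PySem.List.pyGet? s (k : Int)).getD 0;
            if PySem.Int.mod vj vi = 0 then some (PySem.Int.floordiv vj vi)
            else altJ s vi (PySem.List.pyRange ((k : Int) + 1) s.length 1)) = _
      simp only [hget]
      have hcast : ((k : Int) + 1) = ((k + 1 : Nat) : Int) := by push_cast; ring
      rw [rdScan]
      split
      · rfl
      · rw [hcast]; exact ih (k + 1) (by omega) (by omega)

-- outer loop: on a sorted list, the index loop from k onward computes rdPerform of the suffix
theorem altI_eq_rdPerform (s : List Int) (hs : s.Pairwise (· ≤ ·)) (k : Nat) (hk : k ≤ s.length) :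
    altI s (PySem.List.pyRange (k : Int) s.length 1) = rdPerform (s.drop k) := by
  induction hd : s.length - k generalizing k with
  | zero =>
      have hk' : k = s.length := by omega
      subst hk'
      rw [List.drop_length]
      have : PySem.List.pyRange (s.length : Int) s.length 1 = [] := by
        simp
      rw [this]
      simp [altI, rdPerform]
  | succ m ih =>
      have hlt : k < s.length := by omega
      have hdrop : s.drop k = s[k] :: s.drop (k + 1) := List.drop_eq_getElem_cons hlt
      have hsorted_suffix : (s.drop k).Pairwise (· ≤ ·) := hs.drop
      -- sorted of the already-sorted suffix is itself
      have hself : PySem.List.sorted (s.drop k) (fun x => x) false = s.drop k :=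
        PySem.List.sorted_eq_self_of_pairwise _ _ hsorted_suffix
      rw [PySem.List.pyRange_one_cons (by exact_mod_cast hlt)]
      have hget : (PySem.List.pyGet? s (k : Int)).getD 0 = s[k] := by
        rw [PySem.List.pyGet?_natCast]
        simp [List.getElem?_eq_getElem hlt]
      rw [hdrop, rdPerform]
      rw [hdrop] at hself
      rw [hself]
      show (let vi := (PySem.List.pyGet? s (k : Int)).getD 0;
            match altJ s vi (PySem.List.pyRange ((k : Int) + 1) s.length 1) with
            | some q => q
            | none => altI s (PySem.List.pyRange ((k : Int) + 1) s.length 1)) = _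
      simp only [hget]
      have hcast : ((k : Int) + 1) = ((k + 1 : Nat) : Int) := by push_cast; ring
      rw [hcast, altJ_eq_rdScan s (s[k]) (k + 1) (by omega)]
      cases hscan : rdScan (s[k]) (s.drop (k + 1)) with
      | some q => simp
      | none =>
          simp only
          have hself2 : PySem.List.sorted (s.drop (k + 1)) (fun x => x) false = s.drop (k + 1) :=
            PySem.List.sorted_eq_self_of_pairwise _ _ hs.drop
          rw [hself2]
          exact ih (k + 1) (by omega) (by omega)

-- ===== VERDICT (by name: the statement is the Claim_ definition above) =====
theorem row_dividers_spec : Claim_equal_row_dividers := by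
  intro row _ _
  unfold Spec_row_dividers row_dividers row_dividers_alt
  set s := PySem.List.sorted row (fun x => x) false with hsdef
  have hs : s.Pairwise (· ≤ ·) := by
    simpa using PySem.List.sorted_pairwise (xs := row) (key := fun x => x)
  have := altI_eq_rdPerform s hs 0 (by omega)
  simpa using this.symm
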